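-- pv_equiv track=rewrite | github.com/killerxzol/sentimental-hmm | models/shmm/utils.py | polar_split
-- ===== SOURCE A (Python) =====
-- def polar_split(X, targets):
--     X_positive, y_positive, X_negative, y_negative = [], [], [], []
--     for sentence, target in zip(X, targets):
--         if sentence:
--             x, y = zip(*sentence)
--         else:
--             x, y = [], []
--         if target == 1:
--             X_positive.append(x)
--             y_positive.append(y)
--         else:
--             X_negative.append(x)
--             y_negative.append(y)
--     return X_positive, y_positive, X_negative, y_negative
-- ===== SOURCE B (Python) =====
-- def _unzip(sentence):
--     if sentence:
--         x, y = zip(*sentence)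
--         return x, y
--     return [], []
--
--
-- def polar_split(X, targets):
--     pos = [s for s, t in zip(X, targets) if t == 1]
--     neg = [s for s, t in zip(X, targets) if t != 1]
--     X_positive = [_unzip(s)[0] for s in pos]
--     y_positive = [_unzip(s)[1] for s in pos]
--     X_negative = [_unzip(s)[0] for s in neg]
--     y_negative = [_unzip(s)[1] for s in neg]
--     return X_positive, y_positive, X_negative, y_negative
-- ===== Notes on version B (the rewrite author's own statement) =====
-- stated objective: alternative
-- what changed: Replaces A's single branching loop with four accumulators by a filter-then-map pipeline: first select positive/negative sentences from zip(X, targets), then map an unzip helper over each selection.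
import Mathlib
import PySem

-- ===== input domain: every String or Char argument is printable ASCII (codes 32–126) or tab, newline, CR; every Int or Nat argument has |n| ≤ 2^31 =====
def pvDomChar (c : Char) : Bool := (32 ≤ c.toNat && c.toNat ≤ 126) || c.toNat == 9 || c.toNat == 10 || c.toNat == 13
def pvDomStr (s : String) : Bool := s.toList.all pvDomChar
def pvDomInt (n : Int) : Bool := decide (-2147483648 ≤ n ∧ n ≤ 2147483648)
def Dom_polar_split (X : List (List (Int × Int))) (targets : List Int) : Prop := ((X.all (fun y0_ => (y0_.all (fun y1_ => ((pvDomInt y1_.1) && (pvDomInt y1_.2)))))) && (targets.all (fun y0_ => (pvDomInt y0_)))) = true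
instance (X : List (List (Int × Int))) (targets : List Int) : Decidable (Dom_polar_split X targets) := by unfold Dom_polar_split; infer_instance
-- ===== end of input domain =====

-- B restructures A's single branching loop into a filter-then-map pipeline (alternative decomposition, same cost).

-- ===== PORT A =====
-- A: one loop over zip(X, targets), unzipping each sentence and appending to one of four accumulators.
def polar_split (X : List (List (Int × Int))) (targets : List Int) : List (List Int) × List (List Int) × List (List Int) × List (List Int) :=
  (X.zip targets).foldl
    (fun acc st =>
      -- x, y = zip(*sentence) if sentence else ([], [])
      let xy : List Int × List Int :=
        if st.1 ≠ [] then (st.1.map Prod.fst, st.1.map Prod.snd) else ([], [])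
      if st.2 = 1 then
        (acc.1 ++ [xy.1], acc.2.1 ++ [xy.2], acc.2.2.1, acc.2.2.2)
      else
        (acc.1, acc.2.1, acc.2.2.1 ++ [xy.1], acc.2.2.2 ++ [xy.2]))
    ([], [], [], [])

-- ===== PORT B =====
def pvUnzipB (s : List (Int × Int)) : List Int × List Int :=
  if s ≠ [] then (s.map Prod.fst, s.map Prod.snd) else ([], [])

def polar_split_alt (X : List (List (Int × Int))) (targets : List Int) : List (List Int) × List (List Int) × List (List Int) × List (List Int) :=
  let pos := ((X.zip targets).filter (fun st => st.2 == 1)).map Prod.fst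
  let neg := ((X.zip targets).filter (fun st => st.2 != 1)).map Prod.fst
  (pos.map (fun s => (pvUnzipB s).1),
   pos.map (fun s => (pvUnzipB s).2),
   neg.map (fun s => (pvUnzipB s).1),
   neg.map (fun s => (pvUnzipB s).2))

-- ===== PRECONDITION & SPEC =====
def Spec_polar_split (X : List (List (Int × Int))) (targets : List Int) (out : List (List Int) × List (List Int) × List (List Int) × List (List Int)) : Prop := out = polar_split_alt X targets
instance (X : List (List (Int × Int))) (targets : List Int) (out : List (List Int) × List (List Int) × List (List Int) × List (List Int)) : Decidable (Spec_polar_split X targets out) := by unfold Spec_polar_split; infer_instance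

-- ===== CLAIM (what is proved, stated in full; the proofs are below) =====
def Claim_equal_polar_split : Prop := ∀ (X : List (List (Int × Int))) (targets : List Int), Dom_polar_split X targets → Spec_polar_split X targets (polar_split X targets)

-- ===== LEMMAS AND PROOFS =====

-- A's loop body, named for the proofs below.
def pvStepA (acc : List (List Int) × List (List Int) × List (List Int) × List (List Int))
    (st : List (Int × Int) × Int) : List (List Int) × List (List Int) × List (List Int) × List (List Int) :=
  let xy : List Int × List Int :=
    if st.1 ≠ [] then (st.1.map Prod.fst, st.1.map Prod.snd) else ([], [])
  if st.2 = 1 then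
    (acc.1 ++ [xy.1], acc.2.1 ++ [xy.2], acc.2.2.1, acc.2.2.2)
  else
    (acc.1, acc.2.1, acc.2.2.1 ++ [xy.1], acc.2.2.2 ++ [xy.2])

lemma pvFoldA_acc (l : List (List (Int × Int) × Int))
    (acc : List (List Int) × List (List Int) × List (List Int) × List (List Int)) :
    l.foldl pvStepA acc =
      (acc.1 ++ (l.foldl pvStepA ([], [], [], [])).1,
       acc.2.1 ++ (l.foldl pvStepA ([], [], [], [])).2.1,
       acc.2.2.1 ++ (l.foldl pvStepA ([], [], [], [])).2.2.1,
       acc.2.2.2 ++ (l.foldl pvStepA ([], [], [], [])).2.2.2) := by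
  induction l generalizing acc with
  | nil => simp
  | cons hd tl ih =>
    simp only [List.foldl_cons]
    rw [ih (pvStepA acc hd), ih (pvStepA ([], [], [], []) hd)]
    unfold pvStepA
    by_cases h : hd.2 = 1 <;> simp [h]

lemma pvFoldA_eq_alt (l : List (List (Int × Int) × Int)) :
    l.foldl pvStepA ([], [], [], []) =
      ((l.filter (fun st => st.2 == 1)).map (fun st => (pvUnzipB st.1).1),
       (l.filter (fun st => st.2 == 1)).map (fun st => (pvUnzipB st.1).2),
       (l.filter (fun st => st.2 != 1)).map (fun st => (pvUnzipB st.1).1),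
       (l.filter (fun st => st.2 != 1)).map (fun st => (pvUnzipB st.1).2)) := by
  induction l with
  | nil => simp
  | cons hd tl ih =>
    simp only [List.foldl_cons]
    rw [pvFoldA_acc, ih]
    by_cases h : hd.2 = 1 <;>
      simp [pvStepA, pvUnzipB, h]

-- ===== VERDICT (by name: the statement is the Claim_ definition above) =====
theorem polar_split_spec : Claim_equal_polar_split := by
  intro X targets _
  show polar_split X targets = polar_split_alt X targets
  unfold polar_split polar_split_alt
  rw [show (fun (acc : List (List Int) × List (List Int) × List (List Int) × List (List Int))
        (st : List (Int × Int) × Int) =>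
        let xy : List Int × List Int :=
          if st.1 ≠ [] then (st.1.map Prod.fst, st.1.map Prod.snd) else ([], [])
        if st.2 = 1 then
          (acc.1 ++ [xy.1], acc.2.1 ++ [xy.2], acc.2.2.1, acc.2.2.2)
        else
          (acc.1, acc.2.1, acc.2.2.1 ++ [xy.1], acc.2.2.2 ++ [xy.2])) = pvStepA from rfl]
  rw [pvFoldA_eq_alt]
  simp [List.map_map, Function.comp]
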